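-- pv_equiv track=rewrite | github.com/DahiezU/LicenceS6 | Cryptographie/devoir_Dahiez_Burdy/vigenere/vigenère.py | decalage
-- ===== SOURCE A (Python) =====
-- def est_lettre(lettre):
--     car = ord(lettre.upper())
--     return car>64 and car<91
--
-- def decalage(la_lettre, le_decalage):
--     car = ord(la_lettre.upper())
--     if est_lettre(la_lettre):
--         car += le_decalage
--         while car>90:
--             car -= 26
--         while car<65:
--             car += 26
--         return chr(car)
--     else:
--         return ""
-- ===== SOURCE B (Python) =====
-- def decalage(la_lettre, le_decalage):
--     c = ord(la_lettre.upper())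
--     if 65 <= c <= 90:
--         return chr((c - 65 + le_decalage) % 26 + 65)
--     return ""
-- ===== Notes on version B (the rewrite author's own statement) =====
-- stated objective: simpler
-- what changed: The two normalizing while loops (subtract/add 26 until in range) are replaced by a single closed-form modulo expression, and the est_lettre helper is inlined as a direct range test.
import Mathlib
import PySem

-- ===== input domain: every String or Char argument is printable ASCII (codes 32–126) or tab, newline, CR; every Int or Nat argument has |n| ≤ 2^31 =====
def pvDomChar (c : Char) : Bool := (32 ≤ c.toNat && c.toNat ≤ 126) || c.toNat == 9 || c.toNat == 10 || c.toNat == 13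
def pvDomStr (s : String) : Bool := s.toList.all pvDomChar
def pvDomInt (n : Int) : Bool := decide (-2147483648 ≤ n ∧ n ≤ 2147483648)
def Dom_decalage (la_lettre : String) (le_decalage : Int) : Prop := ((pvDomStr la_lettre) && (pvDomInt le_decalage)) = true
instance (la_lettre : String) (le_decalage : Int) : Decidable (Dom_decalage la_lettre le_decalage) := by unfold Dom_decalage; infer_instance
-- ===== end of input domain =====

-- B replaces A's two normalizing while loops by one closed-form modulo expression (objective: simpler).

-- ===== PORT A =====
-- est_lettre(lettre): car = ord(lettre.upper()); return car>64 and car<91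
-- (ord raises on non-length-1 strings; those inputs are excluded by Pre_decalage)
def est_lettre (lettre : String) : Bool :=
  match (PySem.Str.upper lettre).toList with
  | [c] => decide (64 < (c.toNat : Int) ∧ (c.toNat : Int) < 91)
  | _ => false

-- while car > 90: car -= 26
def normHi (car : Int) : Int :=
  if 90 < car then normHi (car - 26) else car
  termination_by (car - 90).toNat
  decreasing_by omega

-- while car < 65: car += 26
def normLo (car : Int) : Int :=
  if car < 65 then normLo (car + 26) else car
  termination_by (65 - car).toNat
  decreasing_by omega

def decalage (la_lettre : String) (le_decalage : Int) : String :=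
  match (PySem.Str.upper la_lettre).toList with
  | [c] =>
      let car : Int := c.toNat
      if est_lettre la_lettre then
        String.ofList [Char.ofNat (normLo (normHi (car + le_decalage))).toNat]
      else ""
  | _ => ""  -- unreachable under Pre_decalage (Python's ord raises there)

-- ===== PORT B =====
def decalage_alt (la_lettre : String) (le_decalage : Int) : String :=
  match (PySem.Str.upper la_lettre).toList with
  | [u] =>
      let c : Int := u.toNat
      if 65 ≤ c ∧ c ≤ 90 then
        String.ofList [Char.ofNat (PySem.Int.mod (c - 65 + le_decalage) 26 + 65).toNat]
      else ""
  | _ => ""  -- unreachable under Pre_decalage (Python's ord raises there)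

-- ===== PRECONDITION & SPEC =====
-- Python's ord() raises TypeError unless la_lettre is exactly one character; Pre_ admits exactly the inputs A returns on.
def Pre_decalage (la_lettre : String) (le_decalage : Int) : Prop := la_lettre.length = 1
instance (la_lettre : String) (le_decalage : Int) : Decidable (Pre_decalage la_lettre le_decalage) := by unfold Pre_decalage; infer_instance
def pvWitness_decalage : String × Int := ("a", 3)

def Spec_decalage (la_lettre : String) (le_decalage : Int) (out : String) : Prop := out = decalage_alt la_lettre le_decalage
instance (la_lettre : String) (le_decalage : Int) (out : String) : Decidable (Spec_decalage la_lettre le_decalage out) := by unfold Spec_decalage; infer_instance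

-- ===== CLAIM (what is proved, stated in full; the proofs are below) =====
def Claim_equal_decalage : Prop := ∀ (la_lettre : String) (le_decalage : Int), Dom_decalage la_lettre le_decalage → Pre_decalage la_lettre le_decalage → Spec_decalage la_lettre le_decalage (decalage la_lettre le_decalage)

-- ===== LEMMAS AND PROOFS =====

lemma normHi_spec (car : Int) : normHi car ≤ 90 ∧ normHi car % 26 = car % 26 := by
  by_cases h : 90 < car
  · have ih := normHi_spec (car - 26)
    rw [normHi, if_pos h]
    exact ⟨ih.1, by omega⟩
  · rw [normHi, if_neg h]
    exact ⟨by omega, rfl⟩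
  termination_by (car - 90).toNat
  decreasing_by omega

lemma normLo_spec (car : Int) (h90 : car ≤ 90) :
    65 ≤ normLo car ∧ normLo car ≤ 90 ∧ normLo car % 26 = car % 26 := by
  by_cases h : car < 65
  · have ih := normLo_spec (car + 26) (by omega)
    rw [normLo, if_pos h]
    exact ⟨ih.1, ih.2.1, by omega⟩
  · rw [normLo, if_neg h]
    exact ⟨by omega, h90, rfl⟩
  termination_by (65 - car).toNat
  decreasing_by omega

lemma norm_closed (car : Int) : normLo (normHi car) = (car - 65) % 26 + 65 := by
  obtain ⟨h1, h2⟩ := normHi_spec car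
  obtain ⟨g1, g2, g3⟩ := normLo_spec (normHi car) h1
  omega

-- ===== VERDICT (by name: the statement is the Claim_ definition above) =====
theorem decalage_spec : Claim_equal_decalage := by
  intro la_lettre le_decalage _ hpre
  unfold Spec_decalage decalage decalage_alt est_lettre
  have hlen : la_lettre.toList.length = 1 := hpre
  obtain ⟨c, hc⟩ : ∃ c, la_lettre.toList = [c] := by
    cases h : la_lettre.toList with
    | nil => simp [h] at hlen
    | cons a t => cases t with
      | nil => exact ⟨a, rfl⟩
      | cons b t' => simp [h] at hlen
  have hup : (PySem.Str.upper la_lettre).toList = [PySem.Chars.upperChar c] := by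
    simp [PySem.Str.toList_upper, PySem.Chars.upper, hc]
  rw [hup]
  simp only []
  have hmod : PySem.Int.mod ((PySem.Chars.upperChar c).toNat - 65 + le_decalage) 26
      = ((PySem.Chars.upperChar c).toNat - 65 + le_decalage) % 26 :=
    PySem.Int.mod_eq_emod_of_pos (by omega)
  rw [norm_closed, hmod]
  split_ifs with hA hB hB
  · have e : ((PySem.Chars.upperChar c).toNat : Int) + le_decalage - 65
        = ((PySem.Chars.upperChar c).toNat : Int) - 65 + le_decalage := by ring
    rw [e]
  · simp only [decide_eq_true_eq] at hA
    exact absurd ⟨by omega, by omega⟩ hB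
  · simp only [decide_eq_true_eq, not_and, not_lt] at hA
    omega
  · rfl
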